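-- pv_equiv track=rewrite | github.com/jade211/CA268-DataStructures-Python | lab_1_codes.py | move_vow
-- ===== SOURCE A (Python) =====
-- def move_vow(sentence):
--    v = "aeiouAEIOU"
--    vowels = []
--    cons = []
--    for s in sentence:
--       if s in v:
--          vowels.append(s)
--       else:
--          cons.append(s)
--    result = ''.join(vowels) + ''.join(cons)
--    return result
-- ===== SOURCE B (Python) =====
-- def move_vow(sentence):
--     return ''.join(sorted(sentence, key=lambda c: c not in "aeiouAEIOU"))
-- ===== Notes on version B (the rewrite author's own statement) =====
-- stated objective: idiomatic
-- what changed: Replaces the explicit two-bucket partition loop with a single stable sort keyed on vowel-vs-nonvowel, relying on sort stability to keep each group's original order.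
import Mathlib
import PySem

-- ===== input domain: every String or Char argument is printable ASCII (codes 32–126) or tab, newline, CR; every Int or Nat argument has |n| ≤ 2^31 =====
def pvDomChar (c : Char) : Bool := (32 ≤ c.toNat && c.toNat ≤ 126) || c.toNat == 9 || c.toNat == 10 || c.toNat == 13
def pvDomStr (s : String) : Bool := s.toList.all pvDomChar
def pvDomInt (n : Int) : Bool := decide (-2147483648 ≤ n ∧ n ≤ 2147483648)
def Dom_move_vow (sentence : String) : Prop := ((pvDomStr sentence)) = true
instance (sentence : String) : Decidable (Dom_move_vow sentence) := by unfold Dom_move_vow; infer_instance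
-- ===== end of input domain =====

-- B replaces A's two-bucket partition loop with one stable sort on a vowel/non-vowel key (idiomatic; not faster).
-- ===== PORT A =====
-- A: one pass appending each char to a vowels or cons bucket, then join vowels ++ cons.
def pvIsVow (c : Char) : Bool := "aeiouAEIOU".toList.contains c

def move_vow (sentence : String) : String :=
  let p := sentence.toList.foldl
    (fun (p : List Char × List Char) s =>
      if pvIsVow s then (p.1 ++ [s], p.2) else (p.1, p.2 ++ [s]))
    ([], [])
  String.ofList (p.1 ++ p.2)

-- ===== PORT B =====
-- B: ''.join(sorted(sentence, key=lambda c: c not in "aeiouAEIOU")); False/True ported as 0/1.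
def move_vow_alt (sentence : String) : String :=
  String.ofList (PySem.List.sorted sentence.toList (fun c => if pvIsVow c then (0 : Int) else 1))

-- ===== PRECONDITION & SPEC =====
def Spec_move_vow (sentence : String) (out : String) : Prop := out = move_vow_alt sentence
instance (sentence : String) (out : String) : Decidable (Spec_move_vow sentence out) := by unfold Spec_move_vow; infer_instance

-- ===== CLAIM (what is proved, stated in full; the proofs are below) =====
def Claim_equal_move_vow : Prop := ∀ (sentence : String), Dom_move_vow sentence → Spec_move_vow sentence (move_vow sentence)

-- ===== LEMMAS AND PROOFS =====

-- ===== VERDICT (by name: the statement is the Claim_ definition above) =====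
-- insertBy of a consonant (key 1) lands at the end of any list built so far.
theorem pv_ins_cons (x : Char) (ys : List Char) (hx : pvIsVow x = false) :
    PySem.List.insertBy
      (fun a b => decide ((if pvIsVow a then (0:Int) else 1) < (if pvIsVow b then (0:Int) else 1))) x ys
      = ys ++ [x] := by
  apply PySem.List.insertBy_of_forall_not_before
  intro y hy
  simp [hx]
  split <;> omega

-- insertBy of a vowel into (vowels ++ consonants) lands right after the vowels.
theorem pv_ins_vow (x : Char) (V C : List Char) (hx : pvIsVow x = true)
    (hV : ∀ a ∈ V, pvIsVow a = true) (hC : ∀ a ∈ C, pvIsVow a = false) :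
    PySem.List.insertBy
      (fun a b => decide ((if pvIsVow a then (0:Int) else 1) < (if pvIsVow b then (0:Int) else 1))) x (V ++ C)
      = V ++ x :: C := by
  induction V with
  | nil =>
    cases C with
    | nil => simp [PySem.List.insertBy]
    | cons c cs =>
      have hc := hC c (by simp)
      simp [PySem.List.insertBy, hx, hc]
  | cons v vs ih =>
    have hv := hV v (by simp)
    simp only [List.cons_append, PySem.List.insertBy, hx, hv]
    rw [ih (fun a ha => hV a (by simp [ha]))]
    simp

-- the insertion-sort fold maintains (vowels-so-far ++ consonants-so-far)
theorem pv_sort_inv (xs V C : List Char)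
    (hV : ∀ a ∈ V, pvIsVow a = true) (hC : ∀ a ∈ C, pvIsVow a = false) :
    xs.foldl
      (fun acc x => PySem.List.insertBy
        (fun a b => decide ((if pvIsVow a then (0:Int) else 1) < (if pvIsVow b then (0:Int) else 1))) x acc)
      (V ++ C)
      = (V ++ xs.filter pvIsVow) ++ (C ++ xs.filter (fun a => !pvIsVow a)) := by
  induction xs generalizing V C with
  | nil => simp
  | cons x xs ih =>
    by_cases hx : pvIsVow x = true
    · rw [List.foldl_cons, pv_ins_vow x V C hx hV hC]
      have := ih (V ++ [x]) C
        (by intro a ha; rcases List.mem_append.mp ha with h | h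
            · exact hV a h
            · simp at h; subst h; exact hx) hC
      simp only [List.append_assoc] at this ⊢
      rw [show V ++ x :: C = V ++ ([x] ++ C) by simp, this]
      simp [hx]
    · have hx' : pvIsVow x = false := by simpa using hx
      rw [List.foldl_cons, show V ++ C = (V ++ C : List Char) from rfl, pv_ins_cons x (V ++ C) hx']
      have := ih V (C ++ [x]) hV
        (by intro a ha; rcases List.mem_append.mp ha with h | h
            · exact hC a h
            · simp at h; subst h; exact hx')
      rw [show (V ++ C) ++ [x] = V ++ (C ++ [x]) by simp, this]
      simp [hx']

-- A's fold is the filter partition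
theorem pv_A_inv (xs V C : List Char) :
    xs.foldl (fun (p : List Char × List Char) s =>
        if pvIsVow s then (p.1 ++ [s], p.2) else (p.1, p.2 ++ [s])) (V, C)
      = (V ++ xs.filter pvIsVow, C ++ xs.filter (fun a => !pvIsVow a)) := by
  induction xs generalizing V C with
  | nil => simp
  | cons x xs ih =>
    by_cases hx : pvIsVow x = true
    · simp [List.foldl_cons, hx, ih]
    · have hx' : pvIsVow x = false := by simpa using hx
      simp [List.foldl_cons, hx', ih]

theorem move_vow_spec : Claim_equal_move_vow := by
  intro s _
  show move_vow s = move_vow_alt s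
  unfold move_vow move_vow_alt
  rw [PySem.List.sorted_eq_foldl_insertBy]
  have hA := pv_A_inv s.toList [] []
  have hB := pv_sort_inv s.toList [] [] (by simp) (by simp)
  simp only [List.nil_append] at hA hB
  simp [hA, hB]
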